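-- pv_equiv track=rewrite | github.com/mw-el/ai-videoclipper | clips_editor.py | _text_to_slug
-- ===== SOURCE A (Python) =====
-- def _text_to_slug(text: str) -> str:
--     """
--     Convert text to a filesystem-safe slug.
--     Takes first few words and converts to lowercase with underscores.
--     """
--     if not text:
--         return ""
--
--     # Get first 3-4 words
--     words = text.split()[:4]
--     if not words:
--         return ""
--
--     # Join words and sanitize for filesystem
--     slug = "_".join(words).lower()
--     # Remove non-alphanumeric chars except underscore and hyphen
--     slug = ''.join(c if c.isalnum() or c in '-_' else '' for c in slug)
--     # Clean up multiple underscores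
--     while '__' in slug:
--         slug = slug.replace('__', '_')
--     slug = slug.strip('_')
--
--     return slug if slug else ""
-- ===== SOURCE B (Python) =====
-- def _text_to_slug(text: str) -> str:
--     """Single-pass slug builder: filter, collapse '_' runs and drop a leading
--     '_' while scanning, then strip the (at most one) trailing underscore."""
--     words = text.split()[:4]
--     if not words:
--         return ""
--     base = "_".join(words).lower()
--     out = []
--     for c in base:
--         if c.isalnum() or c == '-':
--             out.append(c)
--         elif c == '_' and out and out[-1] != '_':
--             out.append(c)
--     return ''.join(out).rstrip('_')
-- ===== Notes on version B (the rewrite author's own statement) =====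
-- stated objective: alternative
-- what changed: A's three-stage cleanup (filter comprehension, repeated double-underscore replacement until fixpoint, then stripping underscores at both ends) is replaced by one stateful pass that filters, collapses underscore runs and drops a leading underscore while scanning, plus a final right-strip of the single possible trailing underscore.
import Mathlib
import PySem

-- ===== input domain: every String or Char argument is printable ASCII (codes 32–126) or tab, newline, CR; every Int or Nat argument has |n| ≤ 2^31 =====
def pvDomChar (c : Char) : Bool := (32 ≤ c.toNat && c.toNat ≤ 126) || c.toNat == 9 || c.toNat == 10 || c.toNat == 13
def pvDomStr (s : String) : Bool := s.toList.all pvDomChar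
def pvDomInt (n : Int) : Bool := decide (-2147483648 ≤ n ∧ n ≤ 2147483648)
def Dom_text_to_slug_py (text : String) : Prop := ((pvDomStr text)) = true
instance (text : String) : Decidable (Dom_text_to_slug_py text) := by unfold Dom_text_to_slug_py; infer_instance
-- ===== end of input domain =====

-- B replaces A's filter comprehension + while-replace collapse + two-sided strip by one
-- stateful pass that filters, collapses underscore runs and drops a leading underscore as it
-- scans (objective: alternative single-pass decomposition).

-- ===== PORT A =====
-- pvRep: the effect of ONE slug.replace('__','_') pass (leftmost, non-overlapping);
-- needed (with the lemmas below) only to justify termination of A's while loop.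
def pvRep : List Char → List Char
  | [] => []
  | c :: t => if c = '_' ∧ t.head? = some '_' then '_' :: pvRep t.tail else c :: pvRep t
termination_by l => l.length
decreasing_by
  all_goals simp [List.length_tail]

theorem pvRep_go_spec (fuel : Nat) : ∀ (l acc : List Char), l.length ≤ fuel →
    PySem.Chars.replace.go ['_','_'] ['_'] fuel l acc = acc.reverse ++ pvRep l := by
  induction fuel with
  | zero =>
    intro l acc h
    have : l = [] := by cases l <;> simp_all
    subst this
    rw [PySem.Chars.replace.go] <;> simp [pvRep]
  | succ n ih =>
    intro l acc h
    cases l with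
    | nil => rw [PySem.Chars.replace.go] <;> simp [pvRep]
    | cons c t =>
      rw [PySem.Chars.replace.go]
      by_cases hp : c = '_' ∧ t.head? = some '_'
      · obtain ⟨rfl, hh⟩ := hp
        cases t with
        | nil => simp at hh
        | cons d t' =>
          simp at hh; subst hh
          have hpre : ['_','_'].isPrefixOf ('_'::'_'::t') = true := by simp [List.isPrefixOf]
          rw [if_pos hpre]
          show PySem.Chars.replace.go ['_','_'] ['_'] n t' ('_' :: acc) = acc.reverse ++ pvRep ('_'::'_'::t')
          rw [ih t' ('_'::acc) (by simp at h ⊢; omega)]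
          rw [pvRep, if_pos ⟨rfl, rfl⟩]
          simp
      · have hpre : ['_','_'].isPrefixOf (c::t) = false := by
          cases t with
          | nil => simp [List.isPrefixOf]
          | cons d t' =>
            by_contra hcon
            simp [List.isPrefixOf] at hcon
            exact hp ⟨hcon.1.symm, by simp [← hcon.2]⟩
        rw [hpre]
        simp only [Bool.false_eq_true, if_false]
        rw [ih t (c::acc) (by simp at h ⊢; omega)]
        rw [pvRep]
        simp [hp]

theorem pvReplace_eq_pvRep (l : List Char) :
    PySem.Chars.replace l ['_','_'] ['_'] = pvRep l := by
  simp [PySem.Chars.replace]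
  exact pvRep_go_spec l.length l [] le_rfl

theorem pvRep_length_le (l : List Char) : (pvRep l).length ≤ l.length := by
  induction l using pvRep.induct with
  | case1 => simp [pvRep]
  | case2 c t h ih =>
    rw [pvRep, if_pos h]
    obtain ⟨rfl, hh⟩ := h
    cases t with
    | nil => simp at hh
    | cons d t' => simp_all; omega
  | case3 c t h ih => rw [pvRep, if_neg h]; simpa using ih

theorem pvRep_length_lt (l : List Char) (h : ['_','_'] <:+: l) :
    (pvRep l).length < l.length := by
  induction l using pvRep.induct with
  | case1 => simp at h
  | case2 c t hc ih =>
    rw [pvRep, if_pos hc]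
    obtain ⟨rfl, hh⟩ := hc
    cases t with
    | nil => simp at hh
    | cons d t' =>
      simp at hh; subst hh
      have := pvRep_length_le t'
      simp; omega
  | case3 c t hc ih =>
    rw [pvRep, if_neg hc]
    have ht : ['_','_'] <:+: t := by
      rcases (List.infix_cons_iff.mp h) with hpre | hinf
      · exfalso
        rcases hpre with ⟨r, hr⟩
        have hr' : '_' :: '_' :: r = c :: t := hr
        injection hr' with h1 h2
        exact hc ⟨h1.symm, by rw [← h2]; rfl⟩
      · exact hinf
    have := ih ht
    simpa using Nat.succ_lt_succ this

theorem pvReplace_length_lt (l : List Char) (h : PySem.Chars.isIn ['_','_'] l = true) :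
    (PySem.Chars.replace l ['_','_'] ['_']).length < l.length := by
  rw [pvReplace_eq_pvRep]
  exact pvRep_length_lt l ((PySem.Chars.isIn_iff_infix _ _).mp h)

-- the while '__' in slug: slug = slug.replace('__','_') loop of A
def pvCollapse (s : List Char) : List Char :=
  if h : PySem.Chars.isIn ['_','_'] s = true then
    pvCollapse (PySem.Chars.replace s ['_','_'] ['_'])
  else s
termination_by s.length
decreasing_by exact pvReplace_length_lt s h

def text_to_slug_py (text : String) : String :=
  if text == "" then ""
  else
    let words := PySem.List.slice (PySem.Str.split₀ text) none (some 4)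
    if words == [] then ""
    else
      let slug0 := (PySem.Str.lower (PySem.Str.join "_" words)).toList
      let slug1 := slug0.foldl (fun acc c => acc ++ (if PySem.Chars.isalnum c || ['-','_'].contains c then [c] else [])) []
      let slug2 := pvCollapse slug1
      let slug3 := PySem.Chars.stripChars slug2 ['_']
      if slug3 == [] then "" else String.ofList slug3

-- ===== PORT B =====
def text_to_slug_py_alt (text : String) : String :=
  let words := PySem.List.slice (PySem.Str.split₀ text) none (some 4)
  if words == [] then ""
  else
    let base := (PySem.Str.lower (PySem.Str.join "_" words)).toList
    let out := base.foldl (fun out c =>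
      if PySem.Chars.isalnum c || c == '-' then out ++ [c]
      else if c == '_' && !out.isEmpty && out.getLast? != some '_' then out ++ [c]
      else out) []
    -- ''.join(out).rstrip('_')  (rstrip of the single char '_', exact)
    String.ofList ((out.reverse.dropWhile (fun c => c == '_')).reverse)

-- ===== PRECONDITION & SPEC =====
def Spec_text_to_slug_py (text : String) (out : String) : Prop := out = text_to_slug_py_alt text
instance (text : String) (out : String) : Decidable (Spec_text_to_slug_py text out) := by unfold Spec_text_to_slug_py; infer_instance

-- ===== CLAIM (what is proved, stated in full; the proofs are below) =====
def Claim_equal_text_to_slug_py : Prop := ∀ (text : String), Dom_text_to_slug_py text → Spec_text_to_slug_py text (text_to_slug_py text)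

-- ===== LEMMAS AND PROOFS =====

theorem pvRep_head? (l : List Char) : (pvRep l).head? = l.head? := by
  induction l using pvRep.induct with
  | case1 => simp [pvRep]
  | case2 c t h ih => rw [pvRep, if_pos h]; simp [h.1]
  | case3 c t h ih => rw [pvRep, if_neg h]; simp


-- canonical form: collapse every run of '_' to a single '_'
def pvSquash : List Char → List Char
  | [] => []
  | c :: t => if c = '_' ∧ t.head? = some '_' then pvSquash t else c :: pvSquash t

theorem pvSquash_head? (l : List Char) : (pvSquash l).head? = l.head? := by
  induction l with
  | nil => simp [pvSquash]
  | cons c t ih =>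
    rw [pvSquash]
    by_cases h : c = '_' ∧ t.head? = some '_'
    · rw [if_pos h, ih, h.2, h.1]; simp
    · rw [if_neg h]; simp

theorem pvSquash_underscore (t : List Char) :
    pvSquash ('_'::t) = '_' :: pvSquash (t.dropWhile (fun c => c == '_')) := by
  induction t with
  | nil => simp [pvSquash]
  | cons d t' ih =>
    by_cases hd : d = '_'
    · subst hd
      rw [pvSquash, if_pos ⟨rfl, rfl⟩]
      rw [ih]
      simp
    · rw [pvSquash, if_neg (by simp [hd])]
      have hdb : (d == '_') = false := by simp [hd]
      simp [List.dropWhile, hdb]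

theorem pvSquash_rep : ∀ (n : Nat) (l : List Char), l.length ≤ n →
    pvSquash (pvRep l) = pvSquash l := by
  intro n
  induction n with
  | zero =>
    intro l h
    have : l = [] := by cases l <;> simp_all
    subst this; simp [pvRep]
  | succ m ih =>
    intro l h
    cases l with
    | nil => simp [pvRep]
    | cons c t =>
      by_cases hc : c = '_' ∧ t.head? = some '_'
      · obtain ⟨rfl, hh⟩ := hc
        cases t with
        | nil => simp at hh
        | cons d t' =>
          simp at hh; subst hh
          conv_lhs => rw [pvRep]
          rw [if_pos ⟨rfl, rfl⟩]
          simp only [List.tail_cons]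
          conv_rhs => rw [pvSquash]
          rw [if_pos ⟨rfl, rfl⟩]
          by_cases hh' : t'.head? = some '_'
          · have hrh : (pvRep t').head? = some '_' := by rw [pvRep_head?]; exact hh'
            conv_lhs => rw [pvSquash]
            rw [if_pos ⟨rfl, hrh⟩]
            conv_rhs => rw [pvSquash]
            rw [if_pos ⟨rfl, hh'⟩]
            exact ih t' (by simp at h; omega)
          · have hrh : ¬ (pvRep t').head? = some '_' := by rw [pvRep_head?]; exact hh'
            conv_lhs => rw [pvSquash]
            rw [if_neg (by simp [hrh])]
            conv_rhs => rw [pvSquash]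
            rw [if_neg (by simp [hh'])]
            rw [ih t' (by simp at h; omega)]
      · conv_lhs => rw [pvRep]
        rw [if_neg hc]
        have hrh : (pvRep t).head? = t.head? := pvRep_head? t
        conv_lhs => rw [pvSquash]
        rw [if_neg (by rw [hrh]; exact hc)]
        conv_rhs => rw [pvSquash]
        rw [if_neg hc]
        rw [ih t (by simp at h; omega)]

theorem pvSquash_of_no_double (l : List Char) (h : ¬ ['_','_'] <:+: l) :
    pvSquash l = l := by
  induction l with
  | nil => rfl
  | cons c t ih =>
    rw [pvSquash]
    by_cases hc : c = '_' ∧ t.head? = some '_'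
    · exfalso
      obtain ⟨rfl, hh⟩ := hc
      cases t with
      | nil => simp at hh
      | cons d t' =>
        simp at hh; subst hh
        exact h ⟨[], t', by simp⟩
    · rw [if_neg hc, ih]
      intro hinf
      exact h (hinf.trans (List.suffix_cons c t).isInfix)

theorem pvCollapse_eq_pvSquash : ∀ (n : Nat) (l : List Char), l.length ≤ n →
    pvCollapse l = pvSquash l := by
  intro n
  induction n with
  | zero =>
    intro l h
    have : l = [] := by cases l <;> simp_all
    subst this
    rw [pvCollapse, dif_neg (by decide)]
    simp [pvSquash]
  | succ m ih =>
    intro l h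
    rw [pvCollapse]
    by_cases hin : PySem.Chars.isIn ['_','_'] l = true
    · rw [dif_pos hin]
      have hlt := pvReplace_length_lt l hin
      rw [ih _ (by omega)]
      rw [pvReplace_eq_pvRep]
      exact pvSquash_rep l.length l le_rfl
    · rw [dif_neg hin]
      exact (pvSquash_of_no_double l ((PySem.Chars.isIn_eq_false_iff _ _).mp (by simpa using hin))).symm

theorem pvSquash_dropWhile (l : List Char) :
    (pvSquash l).dropWhile (fun c => c == '_') = pvSquash (l.dropWhile (fun c => c == '_')) := by
  induction l with
  | nil => rfl
  | cons c t ih =>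
    by_cases hc : c = '_'
    · subst hc
      rw [pvSquash_underscore]
      simp only [List.dropWhile]
      simp only [beq_self_eq_true]
      have hh : ((pvSquash (t.dropWhile (fun c => c == '_'))).head?) = (t.dropWhile (fun c => c == '_')).head? :=
        pvSquash_head? _
      -- head of dropWhile result is not '_', so outer dropWhile is identity
      cases hx : (t.dropWhile (fun c => c == '_')) with
      | nil => simp [← hx, pvSquash]
      | cons d t' =>
        have hd : (d == '_') = false := by
          have := List.head?_dropWhile_not (fun c => c == '_') t
          rw [hx] at this; simpa using this
        rw [← hx]
        cases hy : pvSquash (t.dropWhile (fun c => c == '_')) with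
        | nil => simp
        | cons e u =>
          have : e = d := by
            have := pvSquash_head? (t.dropWhile (fun c => c == '_'))
            rw [hy, hx] at this; simpa using this
          subst this
          simp [List.dropWhile, hd]
    · rw [pvSquash, if_neg (by simp [hc])]
      have hcb : (c == '_') = false := by simp [hc]
      simp only [List.dropWhile, hcb]
      rw [pvSquash, if_neg (by simp [hc])]

-- B's loop over chars that are neither kept nor '_' is the identity: fold = fold over the filtered list
theorem pvFold_filter (l : List Char) (acc : List Char) :
    List.foldl (fun out c =>
      if PySem.Chars.isalnum c || c == '-' then out ++ [c]
      else if c == '_' && !out.isEmpty && out.getLast? != some '_' then out ++ [c]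
      else out) acc l
    = List.foldl (fun out c =>
      if PySem.Chars.isalnum c || c == '-' then out ++ [c]
      else if c == '_' && !out.isEmpty && out.getLast? != some '_' then out ++ [c]
      else out) acc (l.filter (fun c => PySem.Chars.isalnum c || ['-','_'].contains c)) := by
  induction l generalizing acc with
  | nil => rfl
  | cons c t ih =>
    by_cases hA : (PySem.Chars.isalnum c || ['-','_'].contains c) = true
    · simp only [List.filter_cons, hA, if_pos]
      simp only [List.foldl_cons]
      exact ih _
    · have h1 : (PySem.Chars.isalnum c || c == '-') = false := by
        simp at hA ⊢
        exact ⟨hA.1, fun h => hA.2.1 (by simp [h])⟩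
      have h2 : (c == '_') = false := by
        simp at hA ⊢
        exact fun h => hA.2.2 (by simp [h])
      simp only [List.filter_cons, hA]
      simp only [List.foldl_cons, h1, h2]
      simp only [Bool.false_eq_true, if_false, Bool.false_and, Bool.and_false]
      exact ih acc

theorem pvFold_spec (l : List Char) (acc : List Char)
    (hl : ∀ c ∈ l, (PySem.Chars.isalnum c || ['-','_'].contains c) = true) :
    List.foldl (fun out c =>
      if PySem.Chars.isalnum c || c == '-' then out ++ [c]
      else if c == '_' && !out.isEmpty && out.getLast? != some '_' then out ++ [c]
      else out) acc l
    = acc ++ (if acc.getLast? = some '_' ∨ acc = [] then pvSquash (l.dropWhile (fun c => c == '_')) else pvSquash l) := by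
  induction l generalizing acc with
  | nil => split_ifs <;> simp [pvSquash]
  | cons c t ih =>
    have hc := hl c (by simp)
    by_cases hP : (PySem.Chars.isalnum c || c == '-') = true
    · have hcu : c ≠ '_' := by
        intro h; subst h; revert hP; decide
      simp only [List.foldl_cons, hP, if_pos]
      rw [ih (acc ++ [c]) (fun d hd => hl d (by simp [hd]))]
      have hlast : (acc ++ [c]).getLast? = some c := by simp
      rw [if_neg (by simp [hlast, hcu])]
      have hsq : pvSquash (c :: t) = c :: pvSquash t := by
        rw [pvSquash, if_neg (by simp [hcu])]
      have hdw : (c :: t).dropWhile (fun c => c == '_') = c :: t := by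
        have hcb : (c == '_') = false := by simp [hcu]
        simp [List.dropWhile, hcb]
      split_ifs with hcond
      · rw [hdw, hsq]; simp
      · rw [hsq]; simp
    · have hcu : c = '_' := by
        simp at hc hP
        rcases hc with h | h | h
        · simp [h] at hP
        · simp [h] at hP
        · exact h
      subst hcu
      simp only [List.foldl_cons, hP]
      simp only [Bool.false_eq_true, if_false]
      by_cases hcond : acc.getLast? = some '_' ∨ acc = []
      · have hskip : (('_' == '_') && !acc.isEmpty && acc.getLast? != some '_') = false := by
          rcases hcond with h | h
          · simp [h]
          · simp [h]
        simp only [hskip, Bool.false_eq_true, if_false]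
        rw [ih acc (fun d hd => hl d (by simp [hd]))]
        rw [if_pos hcond, if_pos hcond]
        simp [List.dropWhile]
      · have hc1 : ¬ acc.getLast? = some '_' := fun h => hcond (Or.inl h)
        have hc2 : acc ≠ [] := fun h => hcond (Or.inr h)
        have htake : (('_' == '_') && !acc.isEmpty && acc.getLast? != some '_') = true := by
          simp [hc1, hc2]
        simp only [htake, if_pos]
        rw [ih (acc ++ ['_']) (fun d hd => hl d (by simp [hd]))]
        rw [if_pos (by simp)]
        rw [if_neg hcond]
        rw [pvSquash_underscore]
        simp

-- A's filter comprehension is List.filter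
theorem pvComp_eq_filter (l : List Char) (acc : List Char) :
    List.foldl (fun acc c => acc ++ (if PySem.Chars.isalnum c || ['-','_'].contains c then [c] else [])) acc l
    = acc ++ l.filter (fun c => PySem.Chars.isalnum c || ['-','_'].contains c) := by
  induction l generalizing acc with
  | nil => simp
  | cons c t ih =>
    simp only [List.foldl_cons, List.filter_cons]
    by_cases h : (PySem.Chars.isalnum c || ['-','_'].contains c) = true
    · simp only [h, if_pos]; rw [ih]; simp
    · simp only [h]; rw [ih]; simp [h]

-- the main list-level equation, base = the joined+lowered prefix
theorem pvMain (l : List Char) :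
    (let slug1 := List.foldl (fun acc c => acc ++ (if PySem.Chars.isalnum c || ['-','_'].contains c then [c] else [])) [] l
     let slug3 := PySem.Chars.stripChars (pvCollapse slug1) ['_']
     if slug3 == [] then "" else String.ofList slug3)
    = String.ofList (((List.foldl (fun out c =>
        if PySem.Chars.isalnum c || c == '-' then out ++ [c]
        else if c == '_' && !out.isEmpty && out.getLast? != some '_' then out ++ [c]
        else out) [] l).reverse.dropWhile (fun c => c == '_')).reverse) := by
  have hB : List.foldl (fun out c =>
        if PySem.Chars.isalnum c || c == '-' then out ++ [c]
        else if c == '_' && !out.isEmpty && out.getLast? != some '_' then out ++ [c]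
        else out) [] l
      = pvSquash ((l.filter (fun c => PySem.Chars.isalnum c || ['-','_'].contains c)).dropWhile (fun c => c == '_')) := by
    rw [pvFold_filter]
    rw [pvFold_spec _ [] (fun d hd => (List.mem_filter.mp hd).2)]
    rw [if_pos (Or.inr rfl)]
    exact List.nil_append _
  have hA1 := pvComp_eq_filter l []
  simp only [List.nil_append] at hA1
  simp only [hA1, hB]
  set f := l.filter (fun c => PySem.Chars.isalnum c || ['-','_'].contains c) with hf
  rw [pvCollapse_eq_pvSquash f.length f le_rfl]
  have hstrip : PySem.Chars.stripChars (pvSquash f) ['_']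
      = ((pvSquash (f.dropWhile (fun c => c == '_'))).reverse.dropWhile (fun c => c == '_')).reverse := by
    rw [PySem.Chars.stripChars]
    have hp : (fun c => List.contains ['_'] c) = (fun c => c == '_') := by
      funext c; by_cases h : c = '_' <;> simp [h]
    rw [hp]
    rw [pvSquash_dropWhile]
  rw [hstrip]
  set r := ((pvSquash (f.dropWhile (fun c => c == '_'))).reverse.dropWhile (fun c => c == '_')).reverse with hr
  by_cases hre : r = []
  · simp [hre]
  · simp [hre]

-- ===== VERDICT (by name: the statement is the Claim_ definition above) =====
theorem text_to_slug_py_spec : Claim_equal_text_to_slug_py := by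
  intro text _
  unfold Spec_text_to_slug_py text_to_slug_py text_to_slug_py_alt
  by_cases ht : text == ""
  · have : text = "" := by simpa using ht
    subst this
    simp only [ht]
    decide
  · simp only [ht, Bool.false_eq_true, if_false]
    by_cases hw : (PySem.List.slice (PySem.Str.split₀ text) none (some 4)) == []
    · simp [hw]
    · simp only [hw, Bool.false_eq_true, if_false]
      exact pvMain _
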